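-- pv_equiv track=rewrite | github.com/MTrajK/coding-problems | exercises/05.1-find_el_smaller_left_bigger_right/solution.hide.py | find_element_smaller_left_bigger_right
-- ===== SOURCE A (Python) =====
-- import math
--
-- def find_element_smaller_left_bigger_right(arr):
--     n = len(arr)
--     left_maxs = [-math.inf]
--     right_min = math.inf
--
--     # find all mins from the front
--     for i in range(n - 1):
--         left_maxs.append(max(left_maxs[-1], arr[i]))
--
--     for i in range(n - 1, -1, -1):
--         # check if all left are smaller
--         # and all right are bigger
--         if (left_maxs[i] < arr[i]) and (right_min > arr[i]):
--             return i
--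
--         # don't need a separate for loop for this as mins
--         right_min = min(right_min, arr[i])
--
--     return -1
-- ===== SOURCE B (Python) =====
-- def find_element_smaller_left_bigger_right(arr):
--     # Monotonic stack of candidate (index, value) pairs: a candidate is an index whose
--     # value is strictly greater than everything before it; a later element <= a
--     # candidate's value invalidates (pops) it.  The surviving top is the rightmost
--     # index greater than all on its left and smaller than all on its right.
--     cands = []
--     gmax = None
--     for i, x in enumerate(arr):
--         while cands and cands[-1][1] >= x:
--             cands.pop()
--         if gmax is None or gmax < x:
--             cands.append((i, x))
--             gmax = x
--     return cands[-1][0] if cands else -1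
-- ===== Notes on version B (the rewrite author's own statement) =====
-- stated objective: alternative
-- what changed: A precomputes a prefix-max table and scans right-to-left with an incremental suffix-min, returning at the first hit; B makes one forward pass with a monotonic stack of candidate (index,value) pairs, popping candidates invalidated by a later non-greater element, and returns the index on top of the surviving stack.
import Mathlib
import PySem

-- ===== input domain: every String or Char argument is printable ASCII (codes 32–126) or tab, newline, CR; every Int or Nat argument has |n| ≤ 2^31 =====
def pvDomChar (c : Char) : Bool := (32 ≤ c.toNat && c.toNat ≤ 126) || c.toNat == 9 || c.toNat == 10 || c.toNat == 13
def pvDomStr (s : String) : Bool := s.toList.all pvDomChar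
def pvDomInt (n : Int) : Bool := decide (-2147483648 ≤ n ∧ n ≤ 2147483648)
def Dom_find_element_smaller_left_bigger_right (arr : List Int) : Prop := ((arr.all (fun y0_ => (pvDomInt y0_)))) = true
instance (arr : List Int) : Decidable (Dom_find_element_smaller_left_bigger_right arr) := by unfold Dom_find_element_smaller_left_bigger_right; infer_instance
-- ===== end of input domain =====

-- B replaces A's table-plus-reverse-scan by a single forward pass with a monotonic stack of
-- candidate (index, value) pairs (objective: alternative algorithm, same O(n) cost).

-- Option Int models Python's -inf / +inf sentinels (and B's initial None for the running max):
-- none compares as the identity of max / min respectively, exactly as the floats do against ints.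
def ltO : Option Int → Int → Bool
  | none, _ => true
  | some m, a => decide (m < a)

def gtO : Option Int → Int → Bool
  | none, _ => true
  | some m, a => decide (a < m)

def ominA : Option Int → Int → Option Int
  | none, a => some a
  | some m, a => some (min m a)

def omaxA : Option Int → Int → Option Int
  | none, a => some a
  | some m, a => some (max m a)

-- ===== PORT A =====
-- the reverse loop `for i in range(n-1, -1, -1)` as a counter recursion; counter k processes index k-1
def aLoop (arr : List Int) (lm : List (Option Int)) : Nat → Option Int → Int
  | 0, _ => -1
  | k + 1, rmin =>
    if ltO (lm.getD k none) (arr.getD k 0) && gtO rmin (arr.getD k 0) then (k : Int)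
    else aLoop arr lm k (ominA rmin (arr.getD k 0))

def find_element_smaller_left_bigger_right (arr : List Int) : Int :=
  let n := arr.length
  let leftMaxs := (List.range (n - 1)).foldl
    (fun acc i => acc ++ [omaxA ((acc.getLast?).getD none) (arr.getD i 0)])
    [(none : Option Int)]
  aLoop arr leftMaxs n none

-- ===== PORT B =====
-- the inner `while cands and cands[-1][1] >= x: cands.pop()` loop; the stack is kept top-first
-- (Python appends/pops/reads at the end, this list does it at the head)
def popGE (x : Int) : List (Int × Int) → List (Int × Int)
  | [] => []
  | p :: t => if x ≤ p.2 then popGE x t else p :: t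

-- the loop body: pop invalidated candidates, then push if strictly above the running max
def bStep (s : List (Int × Int) × Option Int) (p : Int × Int) : List (Int × Int) × Option Int :=
  let stack := popGE p.2 s.1
  if ltO s.2 p.2 then ((p.1, p.2) :: stack, some p.2) else (stack, s.2)

def find_element_smaller_left_bigger_right_alt (arr : List Int) : Int :=
  let st := (PySem.List.enumerate arr).foldl bStep ([], none)
  match st.1 with
  | [] => -1
  | p :: _ => p.1

-- ===== PRECONDITION & SPEC =====
def Spec_find_element_smaller_left_bigger_right (arr : List Int) (out : Int) : Prop := out = find_element_smaller_left_bigger_right_alt arr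
instance (arr : List Int) (out : Int) : Decidable (Spec_find_element_smaller_left_bigger_right arr out) := by unfold Spec_find_element_smaller_left_bigger_right; infer_instance

-- ===== CLAIM (what is proved, stated in full; the proofs are below) =====
def Claim_equal_find_element_smaller_left_bigger_right : Prop := ∀ (arr : List Int), Dom_find_element_smaller_left_bigger_right arr → Spec_find_element_smaller_left_bigger_right arr (find_element_smaller_left_bigger_right arr)

-- ===== LEMMAS AND PROOFS =====

-- spec-side helpers: max of a prefix / min of a suffix, none on the empty list
def pmax? : List Int → Option Int
  | [] => none
  | a :: t => some (t.foldl max a)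

def pmin? : List Int → Option Int
  | [] => none
  | a :: t => some (t.foldl min a)

-- the common reference result: last index i < k satisfying the condition, else -1
def condB (arr : List Int) (i : Nat) : Bool :=
  ltO (pmax? (arr.take i)) (arr.getD i 0) && gtO (pmin? (arr.drop (i + 1))) (arr.getD i 0)

def F (arr : List Int) (k : Nat) : Int :=
  (List.range k).foldl (fun acc i => if condB arr i then (i : Int) else acc) (-1)

theorem foldl_min_init (t : List Int) : ∀ a b : Int, List.foldl min (min a b) t = min a (List.foldl min b t) := by
  induction t with
  | nil => intro a b; rfl
  | cons c t ih =>
    intro a b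
    simp only [List.foldl_cons, min_assoc]
    exact ih a (min b c)

theorem pmin_cons (a : Int) (t : List Int) : pmin? (a :: t) = ominA (pmin? t) a := by
  cases t with
  | nil => rfl
  | cons b t =>
    simp only [pmin?, ominA, List.foldl_cons, Option.some.injEq]
    rw [foldl_min_init]
    exact min_comm _ _

theorem pmax_concat (l : List Int) (a : Int) : pmax? (l ++ [a]) = omaxA (pmax? l) a := by
  cases l with
  | nil => rfl
  | cons b t =>
    show pmax? (b :: (t ++ [a])) = omaxA (pmax? (b :: t)) a
    rw [pmax?, pmax?, List.foldl_append]
    rfl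

theorem pmin_concat (l : List Int) (a : Int) : pmin? (l ++ [a]) = ominA (pmin? l) a := by
  cases l with
  | nil => rfl
  | cons b t =>
    show pmin? (b :: (t ++ [a])) = ominA (pmin? (b :: t)) a
    rw [pmin?, pmin?, List.foldl_append]
    rfl

theorem pmin_drop (arr : List Int) (k : Nat) (hk : k < arr.length) :
    pmin? (arr.drop k) = ominA (pmin? (arr.drop (k + 1))) (arr.getD k 0) := by
  rw [List.drop_eq_getElem_cons hk, pmin_cons, List.getD_eq_getElem _ _ hk]

theorem getD_map_range {α : Type} (f : Nat → α) (d : α) (i n : Nat) (h : i < n) :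
    ((List.range n).map f).getD i d = f i := by
  have h' : i < ((List.range n).map f).length := by simpa using h
  rw [List.getD_eq_getElem _ _ h']
  simp

theorem F_succ (arr : List Int) (k : Nat) :
    F arr (k + 1) = if condB arr k then (k : Int) else F arr k := by
  simp [F, List.range_succ, List.foldl_append]

theorem lm_eq (arr : List Int) : ∀ k, k ≤ arr.length →
    (List.range k).foldl
      (fun acc i => acc ++ [omaxA ((acc.getLast?).getD none) (arr.getD i 0)])
      [(none : Option Int)]
    = (List.range (k + 1)).map (fun i => pmax? (arr.take i)) := by
  intro k
  induction k with
  | zero => intro _; simp [pmax?]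
  | succ k ih =>
    intro hk
    have hk' : k < arr.length := hk
    rw [List.range_succ, List.foldl_append, ih (le_of_lt hk')]
    simp only [List.foldl_cons, List.foldl_nil]
    have hlast : (((List.range (k + 1)).map (fun i => pmax? (arr.take i))).getLast?).getD none
        = pmax? (arr.take k) := by
      rw [List.range_succ, List.map_append]
      simp
    rw [hlast]
    have htake : arr.take (k + 1) = arr.take k ++ [arr.getD k 0] := by
      rw [List.getD_eq_getElem _ _ hk']
      rw [List.take_add_one, List.getElem?_eq_getElem hk']
      rfl
    rw [List.range_succ (n := k + 1), List.map_append]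
    simp only [List.map_cons, List.map_nil, List.append_cancel_left_eq, List.cons.injEq, and_true]
    rw [htake, pmax_concat]

theorem aLoop_eq (arr : List Int) (lm : List (Option Int))
    (hlm : ∀ i, i < arr.length → lm.getD i none = pmax? (arr.take i)) :
    ∀ k, k ≤ arr.length → aLoop arr lm k (pmin? (arr.drop k)) = F arr k := by
  intro k
  induction k with
  | zero => intro _; rfl
  | succ k ih =>
    intro hk
    have hk' : k < arr.length := hk
    rw [aLoop, F_succ, hlm k hk']
    have hcond : (ltO (pmax? (arr.take k)) (arr.getD k 0)
        && gtO (pmin? (arr.drop (k + 1))) (arr.getD k 0)) = condB arr k := rfl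
    rw [hcond]
    by_cases h : condB arr k
    · simp [h]
    · simp only [h, if_false, Bool.false_eq_true]
      rw [← pmin_drop arr k hk']
      exact ih (le_of_lt hk')

theorem a_eq_F (arr : List Int) : find_element_smaller_left_bigger_right arr = F arr arr.length := by
  unfold find_element_smaller_left_bigger_right
  have hlm : ∀ i, i < arr.length →
      ((List.range (arr.length - 1)).foldl
        (fun acc i => acc ++ [omaxA ((acc.getLast?).getD none) (arr.getD i 0)])
        [(none : Option Int)]).getD i none = pmax? (arr.take i) := by
    intro i hi
    rw [lm_eq arr (arr.length - 1) (Nat.sub_le _ _)]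
    have hn : arr.length - 1 + 1 = arr.length := by omega
    rw [hn, getD_map_range _ _ _ _ hi]
  have hnone : (none : Option Int) = pmin? (arr.drop arr.length) := by simp [pmin?]
  simpa [hnone] using aLoop_eq arr _ hlm arr.length le_rfl

-- ---------- B side ----------

-- windowed condition: index j qualifies within the prefix arr.take k
def condW (arr : List Int) (k j : Nat) : Bool :=
  ltO (pmax? (arr.take j)) (arr.getD j 0) && gtO (pmin? ((arr.take k).drop (j + 1))) (arr.getD j 0)

-- what the stack holds after the first k elements (top-first)
def stackSpec (arr : List Int) (k : Nat) : List (Int × Int) :=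
  (((List.range k).filter (fun j => condW arr k j)).reverse).map
    (fun (j : Nat) => ((j : Int), arr.getD j 0))

theorem gtO_ominA (m : Option Int) (x v : Int) :
    gtO (ominA m x) v = (gtO m v && decide (v < x)) := by
  cases m with
  | none => simp [gtO, ominA]
  | some m0 => simp [gtO, ominA]

theorem omaxA_eq_ite (m : Option Int) (x : Int) :
    (if ltO m x then some x else m) = omaxA m x := by
  cases m with
  | none => simp [ltO, omaxA]
  | some m0 =>
    simp only [ltO, omaxA]
    by_cases h : m0 < x
    · simp [h, max_eq_right (le_of_lt h)]
    · simp [h, max_eq_left (not_lt.mp h)]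

theorem take_succ_getD (arr : List Int) (k : Nat) (hk : k < arr.length) :
    arr.take (k + 1) = arr.take k ++ [arr.getD k 0] := by
  rw [List.getD_eq_getElem _ _ hk]
  rw [List.take_add_one, List.getElem?_eq_getElem hk]
  rfl

theorem window_succ (arr : List Int) (k j : Nat) (hj : j < k) (hk : k < arr.length) :
    (arr.take (k + 1)).drop (j + 1) = (arr.take k).drop (j + 1) ++ [arr.getD k 0] := by
  rw [take_succ_getD arr k hk]
  rw [List.drop_append_of_le_length]
  simp
  omega

theorem condW_succ (arr : List Int) (k j : Nat) (hj : j < k) (hk : k < arr.length) :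
    condW arr (k + 1) j = (condW arr k j && decide (arr.getD j 0 < arr.getD k 0)) := by
  unfold condW
  rw [window_succ arr k j hj hk, pmin_concat, gtO_ominA]
  cases ltO (pmax? (arr.take j)) (arr.getD j 0) <;> simp

theorem condW_self (arr : List Int) (k : Nat) (hk : k < arr.length) :
    condW arr (k + 1) k = ltO (pmax? (arr.take k)) (arr.getD k 0) := by
  unfold condW
  have hnil : ((arr.take (k + 1)).drop (k + 1)) = [] := by
    apply List.drop_eq_nil_of_le
    simp
  rw [hnil]
  simp [pmin?, gtO]

theorem le_foldl_max : ∀ (t : List Int) (a : Int), a ≤ t.foldl max a := by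
  intro t
  induction t with
  | nil => intro a; simp
  | cons b t ih =>
    intro a
    calc a ≤ max a b := le_max_left a b
    _ ≤ _ := ih (max a b)

theorem mem_le_foldl_max : ∀ (t : List Int) (a x : Int), x ∈ t → x ≤ t.foldl max a := by
  intro t
  induction t with
  | nil => intro a x h; simp at h
  | cons b t ih =>
    intro a x h
    rcases List.mem_cons.mp h with h | h
    · subst h
      calc x ≤ max a x := le_max_right a x
      _ ≤ _ := le_foldl_max t (max a x)
    · exact ih (max a b) x h

theorem lt_of_ltO_pmax (l : List Int) (x v : Int) (hx : x ∈ l)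
    (h : ltO (pmax? l) v = true) : x < v := by
  cases l with
  | nil => simp at hx
  | cons a t =>
    simp only [pmax?, ltO, decide_eq_true_eq] at h
    rcases List.mem_cons.mp hx with hxa | hxt
    · subst hxa; exact lt_of_le_of_lt (le_foldl_max t x) h
    · exact lt_of_le_of_lt (mem_le_foldl_max t a x hxt) h

-- values along the stack are strictly decreasing top-first (i.e. increasing bottom→top)
theorem stackSpec_pairwise (arr : List Int) (k : Nat) (hk : k ≤ arr.length) :
    (stackSpec arr k).Pairwise (fun p q => q.2 < p.2) := by
  unfold stackSpec
  rw [List.pairwise_map, List.pairwise_reverse]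
  have hp : ((List.range k).filter (fun j => condW arr k j)).Pairwise (· < ·) :=
    (List.pairwise_lt_range).filter _
  rw [List.pairwise_iff_forall_sublist] at hp ⊢
  intro a b hsub
  have ha : a ∈ (List.range k).filter (fun j => condW arr k j) := hsub.subset (by simp)
  have hb : b ∈ (List.range k).filter (fun j => condW arr k j) := hsub.subset (by simp)
  have hab : a < b := hp hsub
  have hbmem := List.mem_filter.mp hb
  have hbk : b < k := List.mem_range.mp hbmem.1
  have hcondb : condW arr k b = true := by simpa using hbmem.2
  have hleft : ltO (pmax? (arr.take b)) (arr.getD b 0) = true := by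
    simp only [condW, Bool.and_eq_true] at hcondb
    exact hcondb.1
  have hmem : arr.getD a 0 ∈ arr.take b := by
    have ha' : a < arr.length := lt_of_lt_of_le (lt_of_lt_of_le hab (le_of_lt hbk)) hk
    rw [List.getD_eq_getElem _ _ ha']
    exact List.mem_take_iff_getElem.mpr ⟨a, by simpa using ⟨hab, ha'⟩, rfl⟩
  exact lt_of_ltO_pmax _ _ _ hmem hleft

theorem popGE_eq_filter (x : Int) : ∀ (l : List (Int × Int)),
    l.Pairwise (fun p q => q.2 < p.2) → popGE x l = l.filter (fun p => decide (p.2 < x)) := by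
  intro l
  induction l with
  | nil => intro _; rfl
  | cons p t ih =>
    intro hp
    rw [List.pairwise_cons] at hp
    by_cases h : x ≤ p.2
    · rw [popGE, if_pos h, ih hp.2, List.filter_cons_of_neg (by simpa using not_lt.mpr h)]
    · rw [popGE, if_neg h, List.filter_cons_of_pos (by simpa using not_le.mp h)]
      have heq : t.filter (fun p => decide (p.2 < x)) = t := by
        apply List.filter_eq_self.mpr
        intro q hq
        exact decide_eq_true (lt_trans (hp.1 q hq) (not_le.mp h))
      rw [heq]

theorem filter_map_spec (arr : List Int) (l : List Nat) (x : Int) :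
    ((l.reverse).map (fun (j : Nat) => ((j : Int), arr.getD j 0))).filter (fun p => decide (p.2 < x))
    = (((l.filter (fun j => decide (arr.getD j 0 < x))).reverse).map
        (fun (j : Nat) => ((j : Int), arr.getD j 0))) := by
  rw [List.filter_map, ← List.filter_reverse]
  rfl

theorem popGE_stackSpec (arr : List Int) (k : Nat) (hk : k < arr.length) :
    popGE (arr.getD k 0) (stackSpec arr k)
    = (((List.range k).filter (fun j => condW arr (k + 1) j)).reverse).map
        (fun (j : Nat) => ((j : Int), arr.getD j 0)) := by
  rw [popGE_eq_filter _ _ (stackSpec_pairwise arr k (le_of_lt hk))]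
  unfold stackSpec
  rw [filter_map_spec, List.filter_filter]
  have heq : (List.range k).filter
        (fun a => decide (arr.getD a 0 < arr.getD k 0) && condW arr k a)
      = (List.range k).filter (fun j => condW arr (k + 1) j) :=
    List.filter_congr (fun j hj => by
      rw [condW_succ arr k j (List.mem_range.mp hj) hk, Bool.and_comm])
  rw [heq]

theorem stackSpec_succ (arr : List Int) (k : Nat) (hk : k < arr.length) :
    stackSpec arr (k + 1)
    = (if ltO (pmax? (arr.take k)) (arr.getD k 0)
       then ((k : Int), arr.getD k 0) :: popGE (arr.getD k 0) (stackSpec arr k)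
       else popGE (arr.getD k 0) (stackSpec arr k)) := by
  rw [popGE_stackSpec arr k hk]
  unfold stackSpec
  rw [List.range_succ, List.filter_append]
  by_cases h : ltO (pmax? (arr.take k)) (arr.getD k 0)
  · rw [if_pos h]
    rw [List.filter_cons_of_pos (by rw [condW_self arr k hk]; exact h), List.filter_nil,
      List.reverse_append]
    rfl
  · rw [if_neg h]
    rw [List.filter_cons_of_neg (by rw [condW_self arr k hk]; simpa using h), List.filter_nil,
      List.reverse_append]
    rfl

-- the B fold over the first k indices
theorem bInv (arr : List Int) : ∀ k, k ≤ arr.length →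
    (List.range k).foldl (fun s (j : Nat) => bStep s ((j : Int), arr.getD j 0)) ([], none)
    = (stackSpec arr k, pmax? (arr.take k)) := by
  intro k
  induction k with
  | zero => intro _; simp [stackSpec, pmax?]
  | succ k ih =>
    intro hk
    have hk' : k < arr.length := hk
    rw [List.range_succ, List.foldl_append, ih (le_of_lt hk')]
    simp only [List.foldl_cons, List.foldl_nil, bStep]
    have hmax : pmax? (arr.take (k + 1)) = omaxA (pmax? (arr.take k)) (arr.getD k 0) := by
      rw [take_succ_getD arr k hk', pmax_concat]
    rw [stackSpec_succ arr k hk', hmax, ← omaxA_eq_ite]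
    cases hb : ltO (pmax? (arr.take k)) (arr.getD k 0) <;> simp [hb]

-- condW on the full list is condB
theorem condW_full (arr : List Int) (j : Nat) : condW arr arr.length j = condB arr j := by
  unfold condW condB
  rw [List.take_length]

-- F as the head of the reversed filtered range
theorem F_eq_head (arr : List Int) : ∀ k,
    F arr k = (match ((List.range k).filter (fun j => condB arr j)).reverse with
               | [] => (-1 : Int)
               | j :: _ => (j : Int)) := by
  intro k
  induction k with
  | zero => rfl
  | succ k ih =>
    rw [F_succ, List.range_succ, List.filter_append]
    by_cases h : condB arr k
    · rw [if_pos h, List.filter_cons_of_pos h, List.filter_nil, List.reverse_append]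
      rfl
    · rw [if_neg (by simpa using h), List.filter_cons_of_neg (by simpa using h),
        List.filter_nil, List.reverse_append, ih]
      rfl

theorem enum_eq (arr : List Int) :
    PySem.List.enumerate arr = (List.range arr.length).map
      (fun (j : Nat) => ((j : Int), arr.getD j 0)) := by
  apply List.ext_getElem
  · simp [PySem.List.length_enumerate]
  · intro i h1 h2
    rw [PySem.List.getElem_enumerate]
    have hi : i < arr.length := by simpa [PySem.List.length_enumerate] using h1
    simp [List.getElem?_eq_getElem hi]

theorem b_eq_F (arr : List Int) : find_element_smaller_left_bigger_right_alt arr = F arr arr.length := by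
  unfold find_element_smaller_left_bigger_right_alt
  rw [enum_eq arr, List.foldl_map, bInv arr arr.length le_rfl]
  rw [F_eq_head arr arr.length]
  unfold stackSpec
  rw [List.filter_congr (fun j _ => condW_full arr j)]
  cases ((List.range arr.length).filter (fun j => condB arr j)).reverse with
  | nil => rfl
  | cons j t => rfl

-- ===== VERDICT (by name: the statement is the Claim_ definition above) =====
theorem find_element_smaller_left_bigger_right_spec : Claim_equal_find_element_smaller_left_bigger_right := by
  intro arr _
  unfold Spec_find_element_smaller_left_bigger_right
  rw [a_eq_F, b_eq_F]
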